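-- pv_equiv track=rewrite | github.com/000specific/GIGANTIC | gigantic_project-COPYME/subprojects/annotations_hmms/BLOCK_build_annotation_database/workflow-COPYME-build_annotation_database/ai/scripts/006_ai-python-parse_tmbed.py | extract_topology_regions
-- ===== SOURCE A (Python) =====
-- TOPOLOGY_CHARACTERS___ANNOTATION_TYPES = {
--     'H': 'TM_helix',
--     'h': 'TM_helix',
--     'B': 'TM_beta_barrel',
--     'b': 'TM_beta_barrel',
--     'S': 'signal_peptide',
-- }
--
-- def extract_topology_regions( topology_string: str ) -> list:
--     """
--     Extract contiguous regions of transmembrane or signal peptide characters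
--     from a tmbed topology string.
--
--     Returns a list of tuples: ( annotation_type, start_position, stop_position )
--     where positions are 1-indexed (matching protein sequence coordinates).
--     """
--
--     regions = []
--
--     if not topology_string:
--         return regions
--
--     current_annotation_type = None
--     region_start = None
--
--     for position_index, topology_character in enumerate( topology_string ):
--
--         if topology_character in TOPOLOGY_CHARACTERS___ANNOTATION_TYPES:
--             annotation_type = TOPOLOGY_CHARACTERS___ANNOTATION_TYPES[ topology_character ]
--
--             if annotation_type == current_annotation_type:
--                 # Continuation of current region
--                 pass
--             else:
--                 # End previous region if one was active
--                 if current_annotation_type is not None: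
--                     # Convert from 0-indexed to 1-indexed: start+1 through position_index
--                     regions.append( ( current_annotation_type, region_start + 1, position_index ) )
--
--                 # Start new region
--                 current_annotation_type = annotation_type
--                 region_start = position_index
--
--         else:
--             # Non-TM character (typically '.')
--             if current_annotation_type is not None:
--                 # End the current region
--                 regions.append( ( current_annotation_type, region_start + 1, position_index ) )
--                 current_annotation_type = None
--                 region_start = None
--
--     # Handle region that extends to the end of the sequence
--     if current_annotation_type is not None:
--         regions.append( ( current_annotation_type, region_start + 1, len( topology_string ) ) )
--
--     return regions
-- ===== SOURCE B (Python) =====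
-- TOPOLOGY_CHARACTERS___ANNOTATION_TYPES = {
--     'H': 'TM_helix',
--     'h': 'TM_helix',
--     'B': 'TM_beta_barrel',
--     'b': 'TM_beta_barrel',
--     'S': 'signal_peptide',
-- }
--
-- def extract_topology_regions(topology_string: str) -> list:
--     """Group-scan re-implementation: advance over whole maximal runs of equal
--     annotation type (span of the group found by an inner scan), emitting one
--     region per run with a non-None type."""
--     regions = []
--     n = len(topology_string)
--     i = 0
--     while i < n:
--         key = TOPOLOGY_CHARACTERS___ANNOTATION_TYPES.get(topology_string[i])
--         j = i + 1
--         while j < n and TOPOLOGY_CHARACTERS___ANNOTATION_TYPES.get(topology_string[j]) == key: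
--             j += 1
--         if key is not None:
--             regions.append((key, i + 1, j))
--         i = j
--     return regions
-- ===== Notes on version B (the rewrite author's own statement) =====
-- stated objective: alternative
-- what changed: Replaces A's single stateful scan (current-type/region-start variables with open/close bookkeeping and an end-of-string flush) by a run-based scan: jump over each maximal run of equal mapped annotation type and emit one region per non-None run, with no carried state and no post-loop fixup.
import Mathlib
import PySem

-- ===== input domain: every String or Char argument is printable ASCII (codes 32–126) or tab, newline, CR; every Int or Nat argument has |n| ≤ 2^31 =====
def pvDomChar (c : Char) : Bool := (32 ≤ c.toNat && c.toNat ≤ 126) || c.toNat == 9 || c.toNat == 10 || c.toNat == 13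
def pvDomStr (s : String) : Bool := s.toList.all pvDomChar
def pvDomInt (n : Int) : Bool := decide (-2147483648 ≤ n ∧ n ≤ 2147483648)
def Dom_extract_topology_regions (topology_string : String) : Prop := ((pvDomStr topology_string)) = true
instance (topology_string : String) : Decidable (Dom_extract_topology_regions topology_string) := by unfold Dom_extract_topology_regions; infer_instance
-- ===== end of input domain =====

-- B is an alternative, not faster: A's stateful scan (current type / region start /
-- end-of-string flush) is replaced by a run-based scan that jumps over maximal runs
-- of equal mapped annotation type, emitting one region per non-None run.

-- ===== PORT A =====
-- shared constant: the TOPOLOGY_CHARACTERS___ANNOTATION_TYPES lookup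
-- ('c in dict' + 'dict[c]' in A, 'dict.get(c)' in B)
def annotationType (c : Char) : Option String :=
  if c = 'H' then some "TM_helix"
  else if c = 'h' then some "TM_helix"
  else if c = 'B' then some "TM_beta_barrel"
  else if c = 'b' then some "TM_beta_barrel"
  else if c = 'S' then some "signal_peptide"
  else none

-- A's loop body; state = (regions, current_annotation_type, region_start).
-- Python's region_start is None exactly when current_annotation_type is None and is
-- never read there; we keep a dummy Int 0 in that case.
def aStep (st : List (String × Int × Int) × Option String × Int)
    (pc : Int × Char) : List (String × Int × Int) × Option String × Int :=
  let (regions, cur, rs) := st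
  match annotationType pc.2 with
  | some t =>
      if some t = cur then (regions, cur, rs)
      else
        match cur with
        | some ct => (regions ++ [(ct, rs + 1, pc.1)], some t, pc.1)
        | none => (regions, some t, pc.1)
  | none =>
      match cur with
      | some ct => (regions ++ [(ct, rs + 1, pc.1)], none, 0)
      | none => (regions, cur, rs)

-- A's post-loop flush of a region extending to the end of the sequence
def aFinish (st : List (String × Int × Int) × Option String × Int) (n : Int) :
    List (String × Int × Int) :=
  match st with
  | (regions, some ct, rs) => regions ++ [(ct, rs + 1, n)]
  | (regions, none, _) => regions

def extract_topology_regions (topology_string : String) : List (String × Int × Int) :=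
  if topology_string.toList = [] then []
  else
    aFinish ((PySem.List.enumerate topology_string.toList 0).foldl aStep ([], none, 0))
      (PySem.Str.len topology_string)

-- ===== PORT B =====
-- outer while loop of B: one iteration per maximal run; the inner while loop that
-- advances j over the run is the takeWhile scan
def altLoop (i : Int) (cs : List Char) : List (String × Int × Int) :=
  match cs with
  | [] => []
  | c :: rest =>
    let key := annotationType c
    let k := (rest.takeWhile (fun d => annotationType d == key)).length
    let tail := altLoop (i + 1 + k) (rest.drop k)
    match key with
    | some t => (t, i + 1, i + 1 + k) :: tail
    | none => tail
termination_by cs.length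
decreasing_by simp

def extract_topology_regions_alt (topology_string : String) : List (String × Int × Int) :=
  altLoop 0 topology_string.toList

-- ===== PRECONDITION & SPEC =====
def Spec_extract_topology_regions (topology_string : String) (out : List (String × Int × Int)) : Prop := out = extract_topology_regions_alt topology_string
instance (topology_string : String) (out : List (String × Int × Int)) : Decidable (Spec_extract_topology_regions topology_string out) := by unfold Spec_extract_topology_regions; infer_instance

-- ===== CLAIM (what is proved, stated in full; the proofs are below) =====
def Claim_equal_extract_topology_regions : Prop := ∀ (topology_string : String), Dom_extract_topology_regions topology_string → Spec_extract_topology_regions topology_string (extract_topology_regions topology_string)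

-- ===== LEMMAS AND PROOFS =====

theorem altLoop_nil (i : Int) : altLoop i [] = [] := by
  rw [altLoop.eq_def]

theorem altLoop_cons_some (i : Int) (c : Char) (rest : List Char) (t : String)
    (h : annotationType c = some t) :
    altLoop i (c :: rest)
      = (t, i + 1,
          i + 1 + ((rest.takeWhile (fun d => annotationType d == some t)).length : Int)) ::
        altLoop (i + 1 + ((rest.takeWhile (fun d => annotationType d == some t)).length : Int))
          (rest.drop (rest.takeWhile (fun d => annotationType d == some t)).length) := by
  rw [altLoop.eq_def]
  simp [h]

theorem altLoop_cons_none (i : Int) (c : Char) (rest : List Char)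
    (h : annotationType c = none) :
    altLoop i (c :: rest)
      = altLoop (i + 1 + ((rest.takeWhile (fun d => annotationType d == (none : Option String))).length : Int))
          (rest.drop (rest.takeWhile (fun d => annotationType d == (none : Option String))).length) := by
  rw [altLoop.eq_def]
  simp [h]

-- a leading non-region character only shifts B's scan by one position
theorem altLoop_skipNone (i : Int) (c : Char) (rest : List Char)
    (h : annotationType c = none) :
    altLoop i (c :: rest) = altLoop (i + 1) rest := by
  rw [altLoop_cons_none i c rest h]
  cases rest with
  | nil => simp [altLoop_nil]
  | cons d rest' =>
    by_cases h2 : annotationType d = none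
    · rw [altLoop_cons_none (i + 1) d rest' h2]
      have hb2 : (annotationType d == (none : Option String)) = true := by simp [h2]
      simp only [List.takeWhile_cons, hb2, if_true, List.length_cons, List.drop_succ_cons]
      push_cast
      ring_nf
    · have hb : (annotationType d == (none : Option String)) = false := by
        obtain ⟨u, hu⟩ := Option.ne_none_iff_exists'.mp h2
        simp [hu]
      simp [h2]

-- invariant of A's fold, both with no open region (closed) and with an open
-- region of type t started at rs (open), against B's run-based scan
theorem main_both (cs : List Char) :
    (∀ (i : Int) (regions : List (String × Int × Int)) (rs : Int),
      aFinish ((PySem.List.enumerate cs i).foldl aStep (regions, none, rs))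
          (i + cs.length)
        = regions ++ altLoop i cs)
    ∧ (∀ (i : Int) (regions : List (String × Int × Int)) (t : String) (rs : Int),
      aFinish ((PySem.List.enumerate cs i).foldl aStep (regions, some t, rs))
          (i + cs.length)
        = regions ++ (t, rs + 1,
            i + ((cs.takeWhile (fun d => annotationType d == some t)).length : Int)) ::
          altLoop (i + ((cs.takeWhile (fun d => annotationType d == some t)).length : Int))
            (cs.drop (cs.takeWhile (fun d => annotationType d == some t)).length)) := by
  induction cs with
  | nil =>
    constructor
    · intro i regions rs
      simp [PySem.List.enumerate, aFinish, altLoop_nil]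
    · intro i regions t rs
      simp [PySem.List.enumerate, aFinish, altLoop_nil]
  | cons c rest ih =>
    obtain ⟨ihC, ihO⟩ := ih
    constructor
    · -- closed state
      intro i regions rs
      rw [PySem.List.enumerate_cons]
      cases hc : annotationType c with
      | none =>
        simp only [List.foldl_cons, aStep, hc]
        rw [altLoop_skipNone i c rest hc]
        have := ihC (i + 1) regions rs
        simp only [List.length_cons]
        push_cast
        rw [show i + ((rest.length : Int) + 1) = i + 1 + rest.length by ring]
        exact this
      | some t =>
        simp only [List.foldl_cons, aStep, hc, reduceCtorEq, if_false]
        rw [altLoop_cons_some i c rest t hc]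
        have := ihO (i + 1) regions t i
        simp only [List.length_cons]
        push_cast
        rw [show i + ((rest.length : Int) + 1) = i + 1 + rest.length by ring]
        rw [this]
    · -- open state
      intro i regions t rs
      rw [PySem.List.enumerate_cons]
      cases hc : annotationType c with
      | none =>
        simp only [List.foldl_cons, aStep, hc]
        have hb : (annotationType c == some t) = false := by simp [hc]
        simp only [List.takeWhile_cons, hb, Bool.false_eq_true, if_false, List.length_nil,
          Nat.cast_zero, add_zero, List.drop_zero]
        rw [altLoop_skipNone i c rest hc]
        have := ihC (i + 1) (regions ++ [(t, rs + 1, i)]) 0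
        simp only [List.length_cons, List.append_assoc, List.cons_append,
          List.nil_append] at this ⊢
        push_cast
        rw [show i + ((rest.length : Int) + 1) = i + 1 + rest.length by ring]
        exact this
      | some t' =>
        by_cases ht : t' = t
        · subst ht
          simp only [List.foldl_cons, aStep, hc, if_true]
          have hb : (annotationType c == some t') = true := by simp [hc]
          rw [show i + (((c :: rest).length : Nat) : Int) = i + 1 + rest.length by
            push_cast [List.length_cons]; ring]
          rw [ihO (i + 1) regions t' rs]
          simp only [List.takeWhile_cons, hb, if_true, List.length_cons, List.drop_succ_cons]
          push_cast
          ring_nf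
        · have hne : some t' ≠ some t := by simp [ht]
          simp only [List.foldl_cons, aStep, hc, if_neg hne]
          have hb : (annotationType c == some t) = false := by simp [hc, ht]
          simp only [List.takeWhile_cons, hb, Bool.false_eq_true, if_false, List.length_nil,
            Nat.cast_zero, add_zero, List.drop_zero]
          rw [altLoop_cons_some i c rest t' hc]
          have := ihO (i + 1) (regions ++ [(t, rs + 1, i)]) t' i
          simp only [List.length_cons, List.append_assoc, List.cons_append,
            List.nil_append] at this ⊢
          push_cast
          rw [show i + ((rest.length : Int) + 1) = i + 1 + rest.length by ring]
          rw [this]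

-- ===== VERDICT (by name: the statement is the Claim_ definition above) =====
theorem extract_topology_regions_spec : Claim_equal_extract_topology_regions := by
  intro s _
  unfold Spec_extract_topology_regions extract_topology_regions extract_topology_regions_alt
  by_cases h : s.toList = []
  · simp [h, altLoop_nil]
  · rw [if_neg h]
    have := (main_both s.toList).1 0 [] 0
    simp only [List.nil_append, zero_add] at this
    rw [PySem.Str.len_eq]
    simpa using this
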